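-- pv_equiv track=rewrite | github.com/Ella08070/avaliacaomat | 4.py | colecao4
-- ===== SOURCE A (Python) =====
-- def colecao4(n):
--     if n == 2 or n == 3:
--         return True
--     elif n % 2 == 0:
--         return colecao4(n // 2)
--     elif n % 3 == 0:
--         return colecao4(n // 3)
--     else:
--         return False
-- ===== SOURCE B (Python) =====
-- def colecao4(n):
--     if n < 2:
--         return False
--     while n % 2 == 0:
--         n //= 2
--     while n % 3 == 0:
--         n //= 3
--     return n == 1
-- ===== Notes on version B (the rewrite author's own statement) =====
-- stated objective: simpler
-- what changed: Replaces the branching recursion by a flat guard-then-two-while-loops form: reject n<2, strip all factors of 2, then all factors of 3, and return whether 1 remains; no recursion and no 2-or-3 base case.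
-- crash fix: For n == 0 A recurses on n//2 == 0 forever and raises RecursionError; B returns False immediately (0 is not a product of 2s and 3s). — e.g. on colecao4(0): A raises RecursionError, B returns false
import Mathlib
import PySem

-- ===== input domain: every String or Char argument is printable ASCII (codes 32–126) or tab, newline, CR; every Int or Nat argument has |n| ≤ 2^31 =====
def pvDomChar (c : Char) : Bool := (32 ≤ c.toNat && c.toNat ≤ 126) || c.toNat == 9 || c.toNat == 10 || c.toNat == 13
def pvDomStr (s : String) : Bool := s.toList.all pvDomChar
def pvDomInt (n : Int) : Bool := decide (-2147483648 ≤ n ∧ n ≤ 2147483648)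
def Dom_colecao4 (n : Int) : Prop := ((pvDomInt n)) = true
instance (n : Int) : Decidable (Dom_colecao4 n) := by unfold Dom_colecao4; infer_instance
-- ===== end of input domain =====

-- B replaces A's branching recursion by a guard plus two factor-stripping loops (objective: simpler);
-- for n == 0 the Python A raises RecursionError (excluded by Pre_) while B returns False.

-- ===== PORT A =====
-- literal port of A's recursion; the `n = 0` guard only totalizes the Python
-- divergence at n = 0 (RecursionError), which Pre_colecao4 excludes.
def colecao4 (n : Int) : Bool :=
  if n = 0 then false
  else if n = 2 ∨ n = 3 then true
  else if PySem.Int.mod n 2 = 0 then colecao4 (PySem.Int.floordiv n 2)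
  else if PySem.Int.mod n 3 = 0 then colecao4 (PySem.Int.floordiv n 3)
  else false
termination_by n.natAbs
decreasing_by
  · rw [PySem.Int.floordiv_eq_ediv_of_pos (by omega)]
    rcases (PySem.Int.mod_eq_zero_iff_dvd n 2).mp (by assumption) with ⟨k, rfl⟩
    rw [Int.mul_ediv_cancel_left _ (by omega)]
    simp [Int.natAbs_mul]; omega
  · rw [PySem.Int.floordiv_eq_ediv_of_pos (by omega)]
    rcases (PySem.Int.mod_eq_zero_iff_dvd n 3).mp (by assumption) with ⟨k, rfl⟩
    rw [Int.mul_ediv_cancel_left _ (by omega)]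
    simp [Int.natAbs_mul]; omega

-- ===== PORT B =====
-- `while n % 2 == 0: n //= 2` — the `0 < m` conjunct only totalizes the loop
-- (in B this loop is only ever entered with n ≥ 2, where it is vacuously true).
def strip2 (m : Int) : Int :=
  if 0 < m ∧ PySem.Int.mod m 2 = 0 then strip2 (PySem.Int.floordiv m 2) else m
termination_by m.natAbs
decreasing_by
  rename_i h
  rw [PySem.Int.floordiv_eq_ediv_of_pos (by omega)]
  rcases (PySem.Int.mod_eq_zero_iff_dvd m 2).mp h.2 with ⟨k, rfl⟩
  rw [Int.mul_ediv_cancel_left _ (by omega)]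
  simp [Int.natAbs_mul]; omega

-- `while n % 3 == 0: n //= 3`
def strip3 (m : Int) : Int :=
  if 0 < m ∧ PySem.Int.mod m 3 = 0 then strip3 (PySem.Int.floordiv m 3) else m
termination_by m.natAbs
decreasing_by
  rename_i h
  rw [PySem.Int.floordiv_eq_ediv_of_pos (by omega)]
  rcases (PySem.Int.mod_eq_zero_iff_dvd m 3).mp h.2 with ⟨k, rfl⟩
  rw [Int.mul_ediv_cancel_left _ (by omega)]
  simp [Int.natAbs_mul]; omega

def colecao4_alt (n : Int) : Bool :=
  if n < 2 then false
  else decide (strip3 (strip2 n) = 1)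

-- ===== PRECONDITION & SPEC =====
-- Pre_ excludes only n = 0, on which the Python A exceeds the recursion limit (RecursionError).
def Pre_colecao4 (n : Int) : Prop := n ≠ 0
instance (n : Int) : Decidable (Pre_colecao4 n) := by unfold Pre_colecao4; infer_instance
def pvWitness_colecao4 : Int := (12)

-- For n == 0 A recurses on n//2 == 0 forever and raises RecursionError; B returns False.
def Raises_colecao4 (n : Int) : Prop := n = 0
instance (n : Int) : Decidable (Raises_colecao4 n) := by unfold Raises_colecao4; infer_instance
def pvRaiseWitness_colecao4 : Int := (0)
def pvRaiseWitnessOut_colecao4 : Bool := false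

def Spec_colecao4 (n : Int) (out : Bool) : Prop := out = colecao4_alt n
instance (n : Int) (out : Bool) : Decidable (Spec_colecao4 n out) := by unfold Spec_colecao4; infer_instance

-- ===== CLAIM (what is proved, stated in full; the proofs are below) =====
def Claim_equal_colecao4 : Prop := ∀ (n : Int), Dom_colecao4 n → Pre_colecao4 n → Spec_colecao4 n (colecao4 n)
def Claim_raises_colecao4 : Prop := (∀ (n : Int), Dom_colecao4 n → Raises_colecao4 n → ¬ Pre_colecao4 n) ∧ (Dom_colecao4 (pvRaiseWitness_colecao4) ∧ Raises_colecao4 (pvRaiseWitness_colecao4) ∧ colecao4_alt (pvRaiseWitness_colecao4) = pvRaiseWitnessOut_colecao4)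

-- ===== LEMMAS AND PROOFS =====


theorem strip2_step (m : Int) (h1 : 0 < m) (h2 : PySem.Int.mod m 2 = 0) :
    strip2 m = strip2 (PySem.Int.floordiv m 2) := by
  rw [strip2, if_pos ⟨h1, h2⟩]

theorem strip2_eq (m : Int) (h : PySem.Int.mod m 2 ≠ 0) : strip2 m = m := by
  rw [strip2, if_neg (by tauto)]

theorem strip3_step (m : Int) (h1 : 0 < m) (h2 : PySem.Int.mod m 3 = 0) :
    strip3 m = strip3 (PySem.Int.floordiv m 3) := by
  rw [strip3, if_pos ⟨h1, h2⟩]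

theorem strip3_eq (m : Int) (h : PySem.Int.mod m 3 ≠ 0) : strip3 m = m := by
  rw [strip3, if_neg (by tauto)]

theorem alt_lt_two (n : Int) (h : n < 2) : colecao4_alt n = false := by
  simp [colecao4_alt, h]

theorem alt_ge_two (n : Int) (h : ¬ n < 2) :
    colecao4_alt n = decide (strip3 (strip2 n) = 1) := by
  simp [colecao4_alt, h]

theorem main_equiv (k : Nat) : ∀ n : Int, n.natAbs ≤ k → n ≠ 0 → colecao4 n = colecao4_alt n := by
  induction k with
  | zero => intro n hle h0; omega
  | succ k ih =>
    intro n hle h0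
    by_cases h23 : n = 2 ∨ n = 3
    · rcases h23 with rfl | rfl
      · rw [colecao4]; norm_num
        rw [alt_ge_two 2 (by omega), strip2_step 2 (by omega) (by decide)]
        norm_num [show PySem.Int.floordiv 2 2 = 1 from by decide,
          strip2_eq 1 (by decide), strip3_eq 1 (by decide)]
      · rw [colecao4]; norm_num
        rw [alt_ge_two 3 (by omega), strip2_eq 3 (by decide),
          strip3_step 3 (by omega) (by decide)]
        norm_num [show PySem.Int.floordiv 3 3 = 1 from by decide,
          strip3_eq 1 (by decide), strip2_eq 1 (by decide)]
    · by_cases h2 : PySem.Int.mod n 2 = 0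
      · -- even branch: A recurses on n // 2
        obtain ⟨m, rfl⟩ := (PySem.Int.mod_eq_zero_iff_dvd n 2).mp h2
        have hfd : PySem.Int.floordiv (2 * m) 2 = m := by
          rw [PySem.Int.floordiv_eq_ediv_of_pos (by omega), Int.mul_ediv_cancel_left _ (by omega)]
        have hm0 : m ≠ 0 := by omega
        have hA : colecao4 (2 * m) = colecao4 m := by
          rw [colecao4]
          simp only [if_neg h0, if_neg h23, if_pos h2, hfd]
        have hle' : m.natAbs ≤ k := by simp [Int.natAbs_mul] at hle ⊢; omega
        rw [hA, ih m hle' hm0]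
        rcases (show m < 0 ∨ 0 ≤ m by omega) with hneg | hpos
        · rw [alt_lt_two _ (by omega), alt_lt_two _ (by omega)]
        · -- m > 0, and 2*m ≠ 2 so m ≥ 2
          have hm2 : 2 ≤ m := by omega
          rw [alt_ge_two (2 * m) (by omega), alt_ge_two m (by omega),
            strip2_step (2 * m) (by omega) h2, hfd]
      · by_cases h3 : PySem.Int.mod n 3 = 0
        · -- odd, divisible by 3: A recurses on n // 3
          obtain ⟨m, rfl⟩ := (PySem.Int.mod_eq_zero_iff_dvd n 3).mp h3
          have hfd : PySem.Int.floordiv (3 * m) 3 = m := by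
            rw [PySem.Int.floordiv_eq_ediv_of_pos (by omega), Int.mul_ediv_cancel_left _ (by omega)]
          have hm0 : m ≠ 0 := by omega
          have hA : colecao4 (3 * m) = colecao4 m := by
            rw [colecao4]
            simp only [if_neg h0, if_neg h23, if_neg h2, if_pos h3, hfd]
          have hle' : m.natAbs ≤ k := by simp [Int.natAbs_mul] at hle ⊢; omega
          rw [hA, ih m hle' hm0]
          rcases (show m < 0 ∨ 0 ≤ m by omega) with hneg | hpos
          · rw [alt_lt_two _ (by omega), alt_lt_two _ (by omega)]
          · -- m > 0 and 3*m odd (so m odd), 3*m ≠ 3 so m ≥ 2, odd so m ≥ 3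
            have hmodd : PySem.Int.mod m 2 ≠ 0 := by
              intro hc
              obtain ⟨j, rfl⟩ := (PySem.Int.mod_eq_zero_iff_dvd m 2).mp hc
              exact h2 ((PySem.Int.mod_eq_zero_iff_dvd _ 2).mpr ⟨3 * j, by ring⟩)
            have hmnd : ¬ (2 ∣ m) := fun hd => hmodd ((PySem.Int.mod_eq_zero_iff_dvd m 2).mpr hd)
            have hm3 : 3 ≤ m := by omega
            rw [alt_ge_two (3 * m) (by omega), alt_ge_two m (by omega),
              strip2_eq (3 * m) h2, strip2_eq m hmodd,
              strip3_step (3 * m) (by omega) h3, hfd]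
        · -- neither divisible: A returns False
          have hA : colecao4 n = false := by
            rw [colecao4]
            simp only [if_neg h0, if_neg h23, if_neg h2, if_neg h3]
          rw [hA]
          rcases (show n < 2 ∨ 2 ≤ n by omega) with hlt | hge
          · rw [alt_lt_two _ hlt]
          · rw [alt_ge_two n (by omega), strip2_eq n h2, strip3_eq n h3]
            simp; omega

-- ===== VERDICT (by name: the statement is the Claim_ definition above) =====
theorem colecao4_spec : Claim_equal_colecao4 := by
  intro n _ hn
  unfold Spec_colecao4
  exact main_equiv n.natAbs n le_rfl hn

@[simp] theorem colecao4_raises : Claim_raises_colecao4 := by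
  unfold Claim_raises_colecao4
  exact ⟨fun n _ h => by simp [Raises_colecao4, Pre_colecao4] at *; omega, by decide⟩
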